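-- pv_equiv track=rewrite | github.com/godotgildor/Suns | src/suns_ligand.py | find_atom_indices
-- ===== SOURCE A (Python) =====
-- def find_atom_index(frp, ap):
--     '''This function will loop through the atom lines in frp
--        looking for a line which has the substring given in ap.
--        Substring because the getPdbString function of pymol renumbers
--        the atom numbers starting at 1, so two selections may have the
--        same atoms with different atom numbers.'''
--     for i, atom in enumerate(frp):
--         if(atom.find(ap) >= 0):
--             return i
--     return -1
--
-- def find_atom_indices(fullResiduePdbstr, atomPdbstr):
--     '''This function will take a pdb string, and look
--        for which lines each of the given atom strings
--        appear on.'''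
--     frp = fullResiduePdbstr.split('\n')
--     indices = []
--     for ap in atomPdbstr:
--         index = find_atom_index(frp, ap)
--         if(index >= 0):
--             indices += [index]
--     return indices
-- ===== SOURCE B (Python) =====
-- def find_atom_indices(fullResiduePdbstr, atomPdbstr):
--     '''Single pass over the split lines: record, per pattern, the first
--        line index containing it, then emit them in pattern order.'''
--     lines = fullResiduePdbstr.split('\n')
--     patterns = list(atomPdbstr)
--     first = {}
--     for i, line in enumerate(lines):
--         for ap in patterns:
--             if ap not in first and ap in line:
--                 first[ap] = i
--     return [first[ap] for ap in patterns if ap in first]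
-- ===== Notes on version B (the rewrite author's own statement) =====
-- stated objective: alternative
-- what changed: Inverted the loop nesting: instead of restarting a scan over the lines for every pattern, B makes one pass over the lines, recording in a dict the first matching line index per distinct pattern, and then emits the recorded indices in pattern order.
import Mathlib
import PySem

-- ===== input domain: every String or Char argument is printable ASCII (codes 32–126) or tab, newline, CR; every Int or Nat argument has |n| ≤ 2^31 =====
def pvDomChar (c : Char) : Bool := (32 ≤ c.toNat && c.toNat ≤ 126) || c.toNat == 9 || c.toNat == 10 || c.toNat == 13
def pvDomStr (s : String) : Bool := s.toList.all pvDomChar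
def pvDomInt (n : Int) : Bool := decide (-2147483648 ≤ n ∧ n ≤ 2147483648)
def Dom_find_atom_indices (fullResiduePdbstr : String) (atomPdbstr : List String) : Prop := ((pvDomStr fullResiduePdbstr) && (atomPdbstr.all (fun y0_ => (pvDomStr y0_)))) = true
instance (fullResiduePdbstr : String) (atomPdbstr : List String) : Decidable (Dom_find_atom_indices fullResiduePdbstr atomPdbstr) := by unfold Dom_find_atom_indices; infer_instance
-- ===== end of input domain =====

-- B inverts the loop nesting: one pass over the lines recording the first matching line
-- index per pattern in a dict, then the indices are emitted in pattern order (objective: alternative).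

-- ===== PORT A =====
-- A's helper find_atom_index: loop over enumerate(frp), return i at the first line with atom.find(ap) >= 0, else -1
def findAtomIndexAux (l : List (Int × String)) (ap : String) : Int :=
  match l with
  | [] => -1
  | (i, atom) :: rest => if 0 ≤ PySem.Str.find atom ap then i else findAtomIndexAux rest ap

def find_atom_index (frp : List String) (ap : String) : Int :=
  findAtomIndexAux (PySem.List.enumerate frp 0) ap

def find_atom_indices (fullResiduePdbstr : String) (atomPdbstr : List String) : List Int :=
  -- sep is the literal "\n" ≠ "", so split? is always some; getD [] is never taken
  let frp := (PySem.Str.split? fullResiduePdbstr "\n").getD []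
  atomPdbstr.foldl (fun indices ap =>
    let index := find_atom_index frp ap
    if 0 ≤ index then indices ++ [index] else indices) []

-- ===== PORT B =====
-- inner loop of B: for ap in patterns: if ap not in first and ap in line: first[ap] = i
def scanLine (first : PySem.Dict String Int) (i : Int) (line : String) (patterns : List String) : PySem.Dict String Int :=
  patterns.foldl (fun d ap =>
    if !d.contains ap && PySem.Str.isIn ap line then d.insert ap i else d) first

def find_atom_indices_alt (fullResiduePdbstr : String) (atomPdbstr : List String) : List Int :=
  -- sep is the literal "\n" ≠ "", so split? is always some; getD [] is never taken
  let lines := (PySem.Str.split? fullResiduePdbstr "\n").getD []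
  let patterns := atomPdbstr
  let first := (PySem.List.enumerate lines 0).foldl
    (fun d p => scanLine d p.1 p.2 patterns) PySem.Dict.empty
  patterns.filterMap (fun ap => first.get? ap)

-- ===== PRECONDITION & SPEC =====
def Spec_find_atom_indices (fullResiduePdbstr : String) (atomPdbstr : List String) (out : List Int) : Prop := out = find_atom_indices_alt fullResiduePdbstr atomPdbstr
instance (fullResiduePdbstr : String) (atomPdbstr : List String) (out : List Int) : Decidable (Spec_find_atom_indices fullResiduePdbstr atomPdbstr out) := by unfold Spec_find_atom_indices; infer_instance

-- ===== CLAIM (what is proved, stated in full; the proofs are below) =====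
def Claim_equal_find_atom_indices : Prop := ∀ (fullResiduePdbstr : String) (atomPdbstr : List String), Dom_find_atom_indices fullResiduePdbstr atomPdbstr → Spec_find_atom_indices fullResiduePdbstr atomPdbstr (find_atom_indices fullResiduePdbstr atomPdbstr)

-- ===== LEMMAS AND PROOFS =====

-- common reference: first index (counting from n) of a line containing ap, as an Option
def firstIdx (lines : List String) (ap : String) (n : Int) : Option Int :=
  match lines with
  | [] => none
  | line :: rest => if PySem.Str.isIn ap line then some n else firstIdx rest ap (n + 1)

theorem firstIdx_ge (lines : List String) (ap : String) (n i : Int)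
    (h : firstIdx lines ap n = some i) : n ≤ i := by
  induction lines generalizing n with
  | nil => simp [firstIdx] at h
  | cons line rest ih =>
    simp only [firstIdx] at h
    split at h
    . injection h with h; omega
    . have := ih (n + 1) h; omega

-- A's helper computes firstIdx, with -1 for none
theorem findAtomIndexAux_eq (lines : List String) (ap : String) (n : Int) :
    findAtomIndexAux (PySem.List.enumerate lines n) ap = (firstIdx lines ap n).getD (-1) := by
  induction lines generalizing n with
  | nil => simp [PySem.List.enumerate_nil, findAtomIndexAux, firstIdx]
  | cons line rest ih =>
    rw [PySem.List.enumerate_cons]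
    simp only [findAtomIndexAux, firstIdx, PySem.Str.find_eq, PySem.Str.isIn_eq]
    have hiff : (0 ≤ PySem.Chars.find line.toList ap.toList) ↔
        (PySem.Chars.isIn ap.toList line.toList = true) := by
      rw [PySem.Chars.find_nonneg_iff, PySem.Chars.isIn_iff_infix]
    by_cases h : PySem.Chars.isIn ap.toList line.toList = true
    . rw [if_pos (hiff.mpr h), if_pos h]; rfl
    . rw [if_neg (fun hc => h (hiff.mp hc)), if_neg h, ih]

theorem scanLine_cons (first : PySem.Dict String Int) (i : Int) (line : String)
    (q : String) (rest : List String) :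
    scanLine first i line (q :: rest) =
      scanLine (if (!first.contains q && PySem.Str.isIn q line) = true
                then first.insert q i else first) i line rest := rfl

-- B's inner scan leaves the entry of a pattern not in the list unchanged
theorem scanLine_get?_not_mem (first : PySem.Dict String Int) (i : Int) (line : String)
    (patterns : List String) (ap : String) (hap : ap ∉ patterns) :
    (scanLine first i line patterns).get? ap = first.get? ap := by
  induction patterns generalizing first with
  | nil => rfl
  | cons q rest ih =>
    have hne : ap ≠ q := fun h => hap (h ▸ List.mem_cons_self ..)
    have hrest : ap ∉ rest := fun h => hap (List.mem_cons_of_mem _ h)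
    rw [scanLine_cons]
    split
    . rw [ih _ hrest, PySem.Dict.get?_insert_of_ne _ _ hne]
    . exact ih _ hrest

-- B's inner scan only changes the entry of ap if it was absent and the line matches
theorem scanLine_get? (first : PySem.Dict String Int) (i : Int) (line : String)
    (patterns : List String) (ap : String) (hap : ap ∈ patterns) :
    (scanLine first i line patterns).get? ap =
      if first.get? ap = none ∧ PySem.Str.isIn ap line = true then some i else first.get? ap := by
  induction patterns generalizing first with
  | nil => simp at hap
  | cons q rest ih =>
    rw [scanLine_cons]
    by_cases hmem : ap ∈ rest
    . -- recurse with the updated dict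
      by_cases hq : q = ap
      . subst hq
        by_cases hc : (!first.contains q && PySem.Str.isIn q line) = true
        . rw [if_pos hc]
          have h1 : first.get? q = none := by
            rw [PySem.Dict.get?_eq_none_iff_contains]
            simpa using (Bool.and_elim_left hc)
          have h2 : PySem.Chars.isIn q.toList line.toList = true := by
            simpa using Bool.and_elim_right hc
          rw [ih _ hmem]
          simp [PySem.Dict.get?_insert_self, h1, h2]
        . rw [if_neg hc, ih _ hmem]
      . have hne : ap ≠ q := fun h => hq h.symm
        split
        . rw [ih _ hmem, PySem.Dict.get?_insert_of_ne _ _ hne]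
        . exact ih _ hmem
    . -- ap = q, and the tail does not touch ap
      have hq : q = ap := by
        rcases List.mem_cons.mp hap with h | h
        . exact h.symm
        . exact absurd h hmem
      subst hq
      by_cases hc : (!first.contains q && PySem.Str.isIn q line) = true
      . rw [if_pos hc, scanLine_get?_not_mem _ _ _ _ _ hmem]
        have h1 : first.get? q = none := by
          rw [PySem.Dict.get?_eq_none_iff_contains]
          simpa using (Bool.and_elim_left hc)
        have h2 : PySem.Chars.isIn q.toList line.toList = true := by
          simpa using Bool.and_elim_right hc
        simp [PySem.Dict.get?_insert_self, h1, h2]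
      . rw [if_neg hc, scanLine_get?_not_mem _ _ _ _ _ hmem]
        have hc' : (!first.contains q && PySem.Str.isIn q line) = false := by
          simpa using hc
        rcases Bool.and_eq_false_iff.mp hc' with h | h
        . have hq' : first.get? q ≠ none := by
            intro hcf
            rw [PySem.Dict.get?_eq_none_iff_contains] at hcf
            simp [hcf] at h
          simp [hq']
        . have h' : PySem.Chars.isIn q.toList line.toList = false := by simpa using h
          simp [h']

-- B's line pass: the dict entry of any listed pattern is its first matching line index
theorem buildDict_get? (lines : List String) (patterns : List String) (ap : String)
    (hap : ap ∈ patterns) (d : PySem.Dict String Int) (n : Int) :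
    ((PySem.List.enumerate lines n).foldl (fun d p => scanLine d p.1 p.2 patterns) d).get? ap
      = (d.get? ap).or (firstIdx lines ap n) := by
  induction lines generalizing d n with
  | nil => simp [PySem.List.enumerate_nil, firstIdx]
  | cons line rest ih =>
    rw [PySem.List.enumerate_cons]
    simp only [List.foldl_cons]
    rw [ih _ (n + 1), scanLine_get? _ _ _ _ _ hap]
    simp only [firstIdx]
    by_cases h1 : d.get? ap = none
    . simp only [h1, true_and]
      split <;> simp
    . rcases Option.ne_none_iff_exists'.mp h1 with ⟨v, hv⟩
      simp [hv]

-- A's pattern loop is a filterMap over firstIdx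
theorem foldA_eq (lines : List String) (aps : List String) (acc : List Int) :
    aps.foldl (fun indices ap =>
      let index := find_atom_index lines ap
      if 0 ≤ index then indices ++ [index] else indices) acc
    = acc ++ aps.filterMap (fun ap => firstIdx lines ap 0) := by
  induction aps generalizing acc with
  | nil => simp
  | cons ap rest ih =>
    simp only [List.foldl_cons, List.filterMap_cons]
    rw [show find_atom_index lines ap = (firstIdx lines ap 0).getD (-1) from
      findAtomIndexAux_eq lines ap 0]
    cases h : firstIdx lines ap 0 with
    | none => simp [ih]
    | some i =>
      have : (0:Int) ≤ i := firstIdx_ge lines ap 0 i h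
      simp [this, ih]

-- ===== VERDICT (by name: the statement is the Claim_ definition above) =====
theorem find_atom_indices_spec : Claim_equal_find_atom_indices := by
  intro s aps _
  show find_atom_indices s aps = find_atom_indices_alt s aps
  unfold find_atom_indices find_atom_indices_alt
  rw [foldA_eq]
  simp only [List.nil_append]
  refine (List.filterMap_congr ?_).symm
  intro ap hap
  rw [buildDict_get? _ _ _ hap]
  simp [PySem.Dict.empty, PySem.Dict.get?]
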